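-- pv_equiv track=rewrite | github.com/pcur/ARC-Challenge | augment_arc_training_data.py | apply_spatial_transform
-- ===== SOURCE A (Python) =====
-- from typing import Dict, List, Sequence, Tuple
--
-- Grid = List[List[int]]
--
-- def rotate_grid(grid: Grid, k: int) -> Grid:
--     """
--     Rotates a grid by k * 90 degrees counterclockwise.
--     k can be 0, 1, 2, or 3.
--     """
--     k = k % 4
--
--     if k == 0:
--         return [row[:] for row in grid]
--
--     out = [row[:] for row in grid]
--
--     for _ in range(k):
--         # Counterclockwise rotation:
--         # transpose then reverse row order.
--         out = [list(row) for row in zip(*out)][::-1]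
--
--     return out
--
-- def flip_horizontal(grid: Grid) -> Grid:
--     """
--     Mirrors left-right.
--     """
--     return [list(reversed(row)) for row in grid]
--
-- def flip_vertical(grid: Grid) -> Grid:
--     """
--     Mirrors top-bottom.
--     """
--     return [row[:] for row in reversed(grid)]
--
-- def transpose_grid(grid: Grid) -> Grid:
--     """
--     Swaps rows and columns.
--     This is useful for ARC but optional because it changes orientation differently than rotation/flip.
--     """
--     return [list(row) for row in zip(*grid)]
--
-- def apply_spatial_transform(grid: Grid, transform_name: str) -> Grid:
--     if transform_name == "identity":
--         return [row[:] for row in grid]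
--     if transform_name == "rot90":
--         return rotate_grid(grid, 1)
--     if transform_name == "rot180":
--         return rotate_grid(grid, 2)
--     if transform_name == "rot270":
--         return rotate_grid(grid, 3)
--     if transform_name == "flip_h":
--         return flip_horizontal(grid)
--     if transform_name == "flip_v":
--         return flip_vertical(grid)
--     if transform_name == "transpose":
--         return transpose_grid(grid)
--
--     raise ValueError(f"Unknown spatial transform: {transform_name}")
-- ===== SOURCE B (Python) =====
-- # B: same dispatch, but each rotation/transpose is one direct index-mapping pass
-- # instead of iterating "transpose(zip)+reverse" k times.
-- def apply_spatial_transform(grid, transform_name):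
--     if transform_name == "identity":
--         return [row[:] for row in grid]
--     if transform_name == "flip_h":
--         return [row[::-1] for row in grid]
--     if transform_name == "flip_v":
--         return [row[:] for row in grid[::-1]]
--     R = len(grid)
--     C = len(grid[0]) if grid else 0
--     if transform_name == "rot90":
--         return [[grid[j][C - 1 - i] for j in range(R)] for i in range(C)]
--     if transform_name == "rot180":
--         return [[grid[R - 1 - i][C - 1 - j] for j in range(C)] for i in range(R)]
--     if transform_name == "rot270":
--         return [[grid[R - 1 - j][i] for j in range(R)] for i in range(C)]
--     if transform_name == "transpose":
--         return [[grid[j][i] for j in range(R)] for i in range(C)]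
--     raise ValueError(f"Unknown spatial transform: {transform_name}")
-- ===== Notes on version B (the rewrite author's own statement) =====
-- stated objective: alternative
-- what changed: Rotations (and transpose) are computed by a single closed-form index-mapping pass per name instead of A's repeated zip-transpose-then-reverse loop iterated k times.
-- outside the precondition, e.g. on apply_spatial_transform([[1, 2], [3]], 'rot90'): A returns [[1, 3]], B raises IndexError; on apply_spatial_transform([[], []], 'rot180'): A returns [], B returns [[], []]
import Mathlib
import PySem

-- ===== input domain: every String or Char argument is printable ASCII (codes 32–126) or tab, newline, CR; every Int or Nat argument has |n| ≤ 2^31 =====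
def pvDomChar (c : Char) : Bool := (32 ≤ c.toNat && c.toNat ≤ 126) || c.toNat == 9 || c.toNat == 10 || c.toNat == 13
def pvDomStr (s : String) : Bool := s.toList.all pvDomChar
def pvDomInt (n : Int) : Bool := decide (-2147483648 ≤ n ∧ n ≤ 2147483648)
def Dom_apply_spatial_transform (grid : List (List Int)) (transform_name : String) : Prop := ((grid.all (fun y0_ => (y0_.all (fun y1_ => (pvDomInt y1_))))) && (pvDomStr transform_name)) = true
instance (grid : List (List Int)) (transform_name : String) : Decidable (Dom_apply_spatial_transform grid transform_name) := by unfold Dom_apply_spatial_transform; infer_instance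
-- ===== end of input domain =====

-- B replaces A's iterated zip-transpose-and-reverse rotation loop by one direct
-- index-mapping pass per transform name (alternative algorithm, same asymptotic cost).


-- ===== PORT A =====

-- zip(*rows): hand port of Python's zip star (truncates at the shortest row; zip(*[]) = []).
-- Fuel = length of the first row: the loop stops no later, because after that many steps the
-- first row is exhausted and the all-nonempty check fails; headD's default is never read.
def pyZipGo : Nat → List (List Int) → List (List Int)
  | 0, _ => []
  | n + 1, rows =>
    if rows.all (fun r => !r.isEmpty) then
      rows.map (fun r => r.headD 0) :: pyZipGo n (rows.map List.tail)
    else []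

def pyZipStar : List (List Int) → List (List Int)
  | [] => []
  | r :: rs => pyZipGo r.length (r :: rs)

def rotate_grid (grid : List (List Int)) (k : Int) : List (List Int) :=
  let k2 := PySem.Int.mod k 4
  if k2 = 0 then grid.map (fun row => row)
  else
    -- for _ in range(k): out = [list(row) for row in zip(*out)][::-1]
    -- (k2 ∈ {1,2,3} here, so toNat is exact)
    (List.range k2.toNat).foldl (fun out _ => (pyZipStar out).reverse) (grid.map (fun row => row))

def flip_horizontal (grid : List (List Int)) : List (List Int) :=
  grid.map List.reverse

def flip_vertical (grid : List (List Int)) : List (List Int) :=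
  grid.reverse.map (fun row => row)

def transpose_grid (grid : List (List Int)) : List (List Int) :=
  pyZipStar grid

def apply_spatial_transform (grid : List (List Int)) (transform_name : String) : List (List Int) :=
  if transform_name = "identity" then grid.map (fun row => row)
  else if transform_name = "rot90" then rotate_grid grid 1
  else if transform_name = "rot180" then rotate_grid grid 2
  else if transform_name = "rot270" then rotate_grid grid 3
  else if transform_name = "flip_h" then flip_horizontal grid
  else if transform_name = "flip_v" then flip_vertical grid
  else if transform_name = "transpose" then transpose_grid grid
  else []  -- raise ValueError — excluded by Pre_

-- ===== PORT B =====
def apply_spatial_transform_alt (grid : List (List Int)) (transform_name : String) : List (List Int) :=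
  if transform_name = "identity" then grid.map (fun row => row)
  else if transform_name = "flip_h" then grid.map List.reverse
  else if transform_name = "flip_v" then grid.reverse
  else
    let R := grid.length
    let C := (grid.headD []).length  -- len(grid[0]) if grid else 0
    -- grid[j][i'] indexing: getD is exact here, Pre_ keeps all indices in range
    -- (Python B raises IndexError on ragged grids, which Pre_ excludes).
    if transform_name = "rot90" then
      (List.range C).map (fun i => (List.range R).map (fun j => (grid.getD j []).getD (C - 1 - i) 0))
    else if transform_name = "rot180" then
      (List.range R).map (fun i => (List.range C).map (fun j => (grid.getD (R - 1 - i) []).getD (C - 1 - j) 0))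
    else if transform_name = "rot270" then
      (List.range C).map (fun i => (List.range R).map (fun j => (grid.getD (R - 1 - j) []).getD i 0))
    else if transform_name = "transpose" then
      (List.range C).map (fun i => (List.range R).map (fun j => (grid.getD j []).getD i 0))
    else []  -- raise ValueError — excluded by Pre_

-- ===== PRECONDITION & SPEC =====
-- Pre_ excludes unknown names (A raises ValueError) and, for the rotation/transpose names only,
-- ragged grids and grids made of zero-width rows: there A's zip silently truncates (B raises
-- IndexError on ragged input) or collapses the row count to 0 — artefacts of zip that neither
-- implementation should be held to.
def Pre_apply_spatial_transform (grid : List (List Int)) (transform_name : String) : Prop :=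
  (transform_name = "identity" ∨ transform_name = "flip_h" ∨ transform_name = "flip_v") ∨
  ((transform_name = "rot90" ∨ transform_name = "rot180" ∨ transform_name = "rot270" ∨ transform_name = "transpose") ∧
   (grid = [] ∨ (0 < (grid.headD []).length ∧ ∀ r ∈ grid, r.length = (grid.headD []).length)))

instance (grid : List (List Int)) (transform_name : String) : Decidable (Pre_apply_spatial_transform grid transform_name) := by unfold Pre_apply_spatial_transform; infer_instance

def pvWitness_apply_spatial_transform : List (List Int) × String := ([[1, 2], [3, 4]], "rot90")

def Spec_apply_spatial_transform (grid : List (List Int)) (transform_name : String) (out : List (List Int)) : Prop := out = apply_spatial_transform_alt grid transform_name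
instance (grid : List (List Int)) (transform_name : String) (out : List (List Int)) : Decidable (Spec_apply_spatial_transform grid transform_name out) := by unfold Spec_apply_spatial_transform; infer_instance

-- ===== CLAIM (what is proved, stated in full; the proofs are below) =====
def Claim_equal_apply_spatial_transform : Prop := ∀ (grid : List (List Int)) (transform_name : String), Dom_apply_spatial_transform grid transform_name → Pre_apply_spatial_transform grid transform_name → Spec_apply_spatial_transform grid transform_name (apply_spatial_transform grid transform_name)

-- ===== LEMMAS AND PROOFS =====

-- a list indexed by getD, as a map over range (used to align A's map-over-rows with B's range map)
lemma map_eq_range_getD {α β : Type} (l : List α) (f : α → β) (e : α) :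
    l.map f = (List.range l.length).map (fun j => f (l.getD j e)) := by
  apply List.ext_getElem
  · simp
  · intro i h1 h2
    have hi : i < l.length := by simpa using h1
    simp [List.getElem?_eq_getElem hi]

lemma getD_map_of_lt {α β : Type} (l : List α) (f : α → β) (j : Nat) (d : β) (e : α)
    (h : j < l.length) : (l.map f).getD j d = f (l.getD j e) := by
  rw [List.getD_eq_getElem _ _ (by simpa using h), List.getD_eq_getElem _ _ h]
  simp

lemma getD_range_map {β : Type} (c : Nat) (F : Nat → β) (p : Nat) (d : β) (h : p < c) :
    ((List.range c).map F).getD p d = F p := by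
  rw [List.getD_eq_getElem _ _ (by simpa using h)]
  simp

lemma reverse_range_map (c : Nat) (f : Nat → List Int) :
    ((List.range c).map f).reverse = (List.range c).map (fun i => f (c - 1 - i)) := by
  apply List.ext_getElem
  · simp
  · intro i h1 h2
    simp

lemma tail_getD (r : List Int) (i : Nat) : r.tail.getD i 0 = r.getD (i + 1) 0 := by
  cases r <;> simp [List.getD]

lemma pyZipGo_rect : ∀ (c : Nat) (rows : List (List Int)), (∀ r ∈ rows, r.length = c) →
    pyZipGo c rows = (List.range c).map (fun i => rows.map (fun r => r.getD i 0)) := by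
  intro c
  induction c with
  | zero => intro rows h; simp [pyZipGo]
  | succ n ih =>
    intro rows h
    have hall : rows.all (fun r => !r.isEmpty) = true := by
      simp only [List.all_eq_true]
      intro r hr
      have h0 := h r hr
      cases r
      · simp at h0
      · simp
    rw [pyZipGo, if_pos hall, ih (rows.map List.tail) ?tails]
    case tails =>
      intro r hr
      simp only [List.mem_map] at hr
      obtain ⟨s, hs, rfl⟩ := hr
      have h0 := h s hs
      cases s
      · simp at h0
      · simp at h0 ⊢; omega
    rw [List.range_succ_eq_map]
    simp only [List.map_cons, List.map_map]
    refine List.cons_eq_cons.mpr ⟨?_, ?_⟩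
    · refine List.map_congr_left fun r hr => ?_
      have h0 := h r hr
      cases r
      · simp at h0
      · rfl
    · refine List.map_congr_left fun i _ => ?_
      simp only [Function.comp]
      exact List.map_congr_left fun r _ => tail_getD r i

lemma pyZipStar_rect (g : List (List Int)) (c : Nat) (hne : g ≠ [])
    (hrect : ∀ r ∈ g, r.length = c) :
    pyZipStar g = (List.range c).map (fun i => g.map (fun r => r.getD i 0)) := by
  match g with
  | [] => exact absurd rfl hne
  | r :: rs =>
    have hr : r.length = c := hrect r (by simp)
    rw [pyZipStar, hr]
    exact pyZipGo_rect c (r :: rs) hrect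

-- one counterclockwise rotation step of A's loop, in closed form on a rectangular grid
lemma rot_step (g : List (List Int)) (c : Nat) (hne : g ≠ [])
    (hrect : ∀ r ∈ g, r.length = c) :
    (pyZipStar g).reverse = (List.range c).map (fun i => g.map (fun r => r.getD (c - 1 - i) 0)) := by
  rw [pyZipStar_rect g c hne hrect, reverse_range_map]


lemma rotate_grid_one (g : List (List Int)) : rotate_grid g 1 = (pyZipStar g).reverse := by
  simp [rotate_grid, PySem.Int.mod, List.map_id', List.range_succ]

lemma rotate_grid_two (g : List (List Int)) :
    rotate_grid g 2 = (pyZipStar ((pyZipStar g).reverse)).reverse := by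
  simp [rotate_grid, PySem.Int.mod, List.map_id', List.range_succ]

lemma rotate_grid_three (g : List (List Int)) :
    rotate_grid g 3 = (pyZipStar ((pyZipStar ((pyZipStar g).reverse)).reverse)).reverse := by
  simp [rotate_grid, PySem.Int.mod, List.map_id', List.range_succ]

-- ===== VERDICT (by name: the statement is the Claim_ definition above) =====
theorem apply_spatial_transform_spec : Claim_equal_apply_spatial_transform := by
  intro grid name hdom hpre
  unfold Spec_apply_spatial_transform
  rcases hpre with (rfl | rfl | rfl) | ⟨hn, hg⟩
  · simp [apply_spatial_transform, apply_spatial_transform_alt]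
  · simp [apply_spatial_transform, apply_spatial_transform_alt, flip_horizontal]
  · simp [apply_spatial_transform, apply_spatial_transform_alt, flip_vertical]
  · rcases hg with rfl | ⟨hw, hrect⟩
    · rcases hn with rfl | rfl | rfl | rfl <;> rfl
    · have hne : grid ≠ [] := by
        intro h; rw [h] at hw; simp at hw
      have hRpos : 0 < grid.length := List.length_pos_iff.mpr hne
      have h1 : (pyZipStar grid).reverse
          = (List.range (grid.headD []).length).map
              (fun i => grid.map (fun r => r.getD ((grid.headD []).length - 1 - i) 0)) :=
        rot_step grid _ hne hrect
      -- the result of one rotation step is rectangular (rows = old columns, width = old rows)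
      have hg1ne : (List.range (grid.headD []).length).map
          (fun i => grid.map (fun r => r.getD ((grid.headD []).length - 1 - i) 0)) ≠ [] := by
        intro h
        have := congrArg List.length h
        simp only [List.length_map, List.length_range, List.length_nil] at this
        omega
      have hg1rect : ∀ r ∈ (List.range (grid.headD []).length).map
          (fun i => grid.map (fun r => r.getD ((grid.headD []).length - 1 - i) 0)),
          r.length = grid.length := by
        intro r hr
        simp only [List.mem_map] at hr
        obtain ⟨i, _, rfl⟩ := hr
        simp
      rcases hn with rfl | rfl | rfl | rfl
      · -- rot90
        have hB : apply_spatial_transform_alt grid "rot90"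
            = (List.range (grid.headD []).length).map
                (fun i => (List.range grid.length).map
                  (fun j => (grid.getD j []).getD ((grid.headD []).length - 1 - i) 0)) := by
          simp [apply_spatial_transform_alt]
        rw [show apply_spatial_transform grid "rot90" = rotate_grid grid 1 from rfl,
          rotate_grid_one, h1, hB]
        refine List.map_congr_left fun i _ => ?_
        rw [map_eq_range_getD grid (fun r => r.getD ((grid.headD []).length - 1 - i) 0) []]
      · -- rot180
        have hB : apply_spatial_transform_alt grid "rot180"
            = (List.range grid.length).map
                (fun i => (List.range (grid.headD []).length).map
                  (fun j => (grid.getD (grid.length - 1 - i) []).getD ((grid.headD []).length - 1 - j) 0)) := by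
          simp [apply_spatial_transform_alt]
        have h2 := rot_step _ grid.length hg1ne hg1rect
        rw [show apply_spatial_transform grid "rot180" = rotate_grid grid 2 from rfl,
          rotate_grid_two, h1, h2, hB]
        refine List.map_congr_left fun i hi => ?_
        simp only [List.mem_range] at hi
        rw [List.map_map]
        refine List.map_congr_left fun p hp => ?_
        simp only [List.mem_range] at hp
        simp only [Function.comp_apply]
        rw [getD_map_of_lt grid _ _ 0 [] (by omega)]
      · -- rot270
        have hB : apply_spatial_transform_alt grid "rot270"
            = (List.range (grid.headD []).length).map
                (fun i => (List.range grid.length).map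
                  (fun j => (grid.getD (grid.length - 1 - j) []).getD i 0)) := by
          simp [apply_spatial_transform_alt]
        have h2 := rot_step _ grid.length hg1ne hg1rect
        have hg2ne : (List.range grid.length).map
            (fun i => ((List.range (grid.headD []).length).map
              (fun i => grid.map (fun r => r.getD ((grid.headD []).length - 1 - i) 0))).map
                (fun r => r.getD (grid.length - 1 - i) 0)) ≠ [] := by
          intro h
          have := congrArg List.length h
          simp only [List.length_map, List.length_range, List.length_nil] at this
          omega
        have hg2rect : ∀ r ∈ (List.range grid.length).map
            (fun i => ((List.range (grid.headD []).length).map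
              (fun i => grid.map (fun r => r.getD ((grid.headD []).length - 1 - i) 0))).map
                (fun r => r.getD (grid.length - 1 - i) 0)),
            r.length = (grid.headD []).length := by
          intro r hr
          simp only [List.mem_map] at hr
          obtain ⟨i, _, rfl⟩ := hr
          simp
        have h3 := rot_step _ (grid.headD []).length hg2ne hg2rect
        rw [show apply_spatial_transform grid "rot270" = rotate_grid grid 3 from rfl,
          rotate_grid_three, h1, h2, h3, hB]
        refine List.map_congr_left fun i hi => ?_
        simp only [List.mem_range] at hi
        rw [List.map_map]
        refine List.map_congr_left fun q hq => ?_
        simp only [List.mem_range] at hq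
        simp only [Function.comp_apply]
        rw [getD_map_of_lt ((List.range (grid.headD []).length).map
              (fun p => grid.map (fun r => r.getD ((grid.headD []).length - 1 - p) 0)))
            (fun r => r.getD (grid.length - 1 - q) 0) ((grid.headD []).length - 1 - i) 0 []
            (by simp only [List.length_map, List.length_range]; omega),
          getD_range_map _ _ _ [] (by omega),
          show (grid.headD []).length - 1 - ((grid.headD []).length - 1 - i) = i by omega,
          getD_map_of_lt grid (fun r => r.getD i 0) _ 0 [] (by omega)]
      · -- transpose
        have hB : apply_spatial_transform_alt grid "transpose"
            = (List.range (grid.headD []).length).map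
                (fun i => (List.range grid.length).map
                  (fun j => (grid.getD j []).getD i 0)) := by
          simp [apply_spatial_transform_alt]
        rw [show apply_spatial_transform grid "transpose" = pyZipStar grid from rfl,
          pyZipStar_rect grid _ hne hrect, hB]
        refine List.map_congr_left fun i _ => ?_
        rw [map_eq_range_getD grid (fun r => r.getD i 0) []]
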